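-- pv_equiv track=rewrite | github.com/jmwork4/operational-intelligence-engine | packages/ai/context_assembly.py | _prune_conversation_history
-- ===== SOURCE A (Python) =====
-- from typing import Any
--
-- def _prune_conversation_history(
--     messages: list[dict[str, Any]], max_tokens: int
-- ) -> list[dict[str, Any]]:
--     """Keep the most recent messages that fit within *max_tokens*.
--
--     System messages are never removed.  Oldest non-system messages are
--     dropped first.
--     """
--     estimate = lambda t: len(t) // 4  # noqa: E731
--
--     system_msgs = [m for m in messages if m.get("role") == "system"]
--     non_system = [m for m in messages if m.get("role") != "system"]
--
--     # Token budget consumed by system messages (always included).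
--     system_tokens = sum(
--         estimate(m.get("content", "")) for m in system_msgs
--     )
--     remaining = max_tokens - system_tokens
--     if remaining <= 0:
--         return system_msgs
--
--     # Walk from newest to oldest, accumulating until budget is exhausted.
--     kept: list[dict[str, Any]] = []
--     for msg in reversed(non_system):
--         msg_tokens = estimate(msg.get("content", ""))
--         if msg_tokens <= remaining:
--             kept.append(msg)
--             remaining -= msg_tokens
--         else:
--             break  # no room for older messages
--
--     # Restore chronological order.
--     kept.reverse()
--     return system_msgs + kept
-- ===== SOURCE B (Python) =====
-- def _prune_conversation_history(messages, max_tokens):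
--     """Keep the most recent messages that fit within *max_tokens*.
--
--     Different decomposition: build the prefix sums of token estimates
--     newest-first, binary-search the largest count that fits, and slice.
--     """
--     estimate = lambda t: len(t) // 4  # noqa: E731
--
--     system_msgs = [m for m in messages if m.get("role") == "system"]
--     non_system = [m for m in messages if m.get("role") != "system"]
--
--     remaining = max_tokens - sum(
--         estimate(m.get("content", "")) for m in system_msgs
--     )
--     if remaining <= 0:
--         return system_msgs
--
--     # Cumulative token cost of the k newest non-system messages, for k = 1..n.
--     prefix = []
--     total = 0
--     for m in reversed(non_system):
--         total += estimate(m.get("content", ""))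
--         prefix.append(total)
--
--     # prefix is nondecreasing: binary search for the largest k with
--     # prefix[k-1] <= remaining (hand-rolled bisect_right).
--     lo, hi = 0, len(prefix)
--     while lo < hi:
--         mid = (lo + hi) // 2
--         if prefix[mid] <= remaining:
--             lo = mid + 1
--         else:
--             hi = mid
--     return system_msgs + non_system[len(non_system) - lo:]
-- ===== Notes on version B (the rewrite author's own statement) =====
-- stated objective: alternative
-- what changed: Replaced A's newest-to-oldest accumulate-and-break loop (append then final reverse) with a precomputed prefix-sum table of token estimates, a hand-rolled bisect_right binary search for the largest count that fits, and a single slice of the chronological list.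
import Mathlib
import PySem

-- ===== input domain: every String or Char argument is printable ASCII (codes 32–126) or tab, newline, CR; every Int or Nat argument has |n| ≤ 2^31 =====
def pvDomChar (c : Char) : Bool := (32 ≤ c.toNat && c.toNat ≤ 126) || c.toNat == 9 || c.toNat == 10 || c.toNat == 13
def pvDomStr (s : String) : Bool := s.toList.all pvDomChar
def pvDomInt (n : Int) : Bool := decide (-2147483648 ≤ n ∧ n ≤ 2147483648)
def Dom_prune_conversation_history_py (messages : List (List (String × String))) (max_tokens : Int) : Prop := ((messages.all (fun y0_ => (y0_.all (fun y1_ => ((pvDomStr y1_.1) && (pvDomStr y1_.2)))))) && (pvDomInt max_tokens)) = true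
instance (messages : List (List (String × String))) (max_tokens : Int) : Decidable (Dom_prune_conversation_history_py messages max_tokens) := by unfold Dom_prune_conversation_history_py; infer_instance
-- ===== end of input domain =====

-- B replaces A's accumulate-and-break-then-reverse loop by a prefix-sum table, a binary
-- search (hand-rolled bisect_right) for the kept count, and one slice; same O(n) cost.

-- ===== PORT A =====
-- estimate = lambda t: len(t) // 4, applied to m.get("content", "") (shared subexpression of both Pythons)
def pvEst (m : List (String × String)) : Int :=
  PySem.Int.floordiv (PySem.Str.len (PySem.Dict.getD ⟨m⟩ "content" "")) 4

-- m.get("role") == "system"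
def pvIsSystem (m : List (String × String)) : Bool :=
  PySem.Dict.get? (⟨m⟩ : PySem.Dict String String) "role" == some "system"

-- the 'for msg in reversed(non_system): … break' loop, state = (remaining, kept)
def pruneKeptA : List (List (String × String)) → Int → List (List (String × String)) → List (List (String × String))
  | [], _, kept => kept
  | msg :: rest, remaining, kept =>
    let msg_tokens := pvEst msg
    if msg_tokens ≤ remaining then pruneKeptA rest (remaining - msg_tokens) (kept ++ [msg])
    else kept

def prune_conversation_history_py (messages : List (List (String × String))) (max_tokens : Int) : List (List (String × String)) :=
  let system_msgs := messages.filter (fun m => pvIsSystem m)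
  let non_system := messages.filter (fun m => !pvIsSystem m)
  let system_tokens := (system_msgs.map pvEst).sum
  let remaining := max_tokens - system_tokens
  if remaining ≤ 0 then system_msgs
  else system_msgs ++ (pruneKeptA non_system.reverse remaining []).reverse

-- ===== PORT B =====
-- the 'for m in reversed(non_system): total += …; prefix.append(total)' loop
def pvBuildPrefix : List (List (String × String)) → Int → List Int → List Int
  | [], _, pre => pre
  | m :: rest, total, pre =>
    let total' := total + pvEst m
    pvBuildPrefix rest total' (pre ++ [total'])

-- the 'while lo < hi' hand-rolled bisect_right loop (p is never indexed out of range)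
def pvBisect (p : List Int) (target : Int) (lo hi : Nat) : Nat :=
  if _h : lo < hi then
    let mid := (lo + hi) / 2
    if PySem.List.pyGetD p (mid : Int) 0 ≤ target then pvBisect p target (mid + 1) hi
    else pvBisect p target lo mid
  else lo
termination_by hi - lo
decreasing_by all_goals simp only [mid] at *; omega

def prune_conversation_history_py_alt (messages : List (List (String × String))) (max_tokens : Int) : List (List (String × String)) :=
  let system_msgs := messages.filter (fun m => pvIsSystem m)
  let non_system := messages.filter (fun m => !pvIsSystem m)
  let remaining := max_tokens - (system_msgs.map pvEst).sum
  if remaining ≤ 0 then system_msgs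
  else
    let pre := pvBuildPrefix non_system.reverse 0 []
    let lo := pvBisect pre remaining 0 pre.length
    system_msgs ++ PySem.List.slice non_system (some ((non_system.length : Int) - (lo : Int))) none

-- ===== PRECONDITION & SPEC =====
def Spec_prune_conversation_history_py (messages : List (List (String × String))) (max_tokens : Int) (out : List (List (String × String))) : Prop := out = prune_conversation_history_py_alt messages max_tokens
instance (messages : List (List (String × String))) (max_tokens : Int) (out : List (List (String × String))) : Decidable (Spec_prune_conversation_history_py messages max_tokens out) := by unfold Spec_prune_conversation_history_py; infer_instance

-- ===== CLAIM (what is proved, stated in full; the proofs are below) =====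
def Claim_equal_prune_conversation_history_py : Prop := ∀ (messages : List (List (String × String))) (max_tokens : Int), Dom_prune_conversation_history_py messages max_tokens → Spec_prune_conversation_history_py messages max_tokens (prune_conversation_history_py messages max_tokens)

-- ===== LEMMAS AND PROOFS =====

-- spec-level prefix sums
def psums : List Int → Int → List Int
  | [], _ => []
  | e :: es, t => (t + e) :: psums es (t + e)

-- length of the leading block of entries ≤ r
def twLen : List Int → Int → Nat
  | [], _ => 0
  | s :: ss, r => if s ≤ r then twLen ss r + 1 else 0

theorem psums_length (es : List Int) (t : Int) : (psums es t).length = es.length := by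
  induction es generalizing t with
  | nil => rfl
  | cons e es ih => simp [psums, ih]

theorem buildPrefix_eq (l : List (List (String × String))) (t : Int) (acc : List Int) :
    pvBuildPrefix l t acc = acc ++ psums (l.map pvEst) t := by
  induction l generalizing t acc with
  | nil => simp [pvBuildPrefix, psums]
  | cons m rest ih => simp [pvBuildPrefix, psums, ih]

theorem pruneKeptA_acc (l : List (List (String × String))) (r : Int) (kept : List (List (String × String))) :
    pruneKeptA l r kept = kept ++ pruneKeptA l r [] := by
  induction l generalizing r kept with
  | nil => simp [pruneKeptA]
  | cons m rest ih =>
    simp only [pruneKeptA]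
    split_ifs with h
    · rw [ih (r - pvEst m) (kept ++ [m]), ih (r - pvEst m) ([] ++ [m])]
      simp
    · simp

theorem pruneKeptA_take (l : List (List (String × String))) (t r : Int) :
    pruneKeptA l r [] = l.take (twLen (psums (l.map pvEst) t) (t + r)) := by
  induction l generalizing t r with
  | nil => simp [pruneKeptA]
  | cons m rest ih =>
    simp only [pruneKeptA, List.map, psums, twLen]
    by_cases h : pvEst m ≤ r
    · rw [if_pos h, if_pos (by omega), pruneKeptA_acc]
      have := ih (t + pvEst m) (r - pvEst m)
      rw [this]
      have harg : t + pvEst m + (r - pvEst m) = t + r := by ring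
      rw [harg]
      simp
    · rw [if_neg h, if_neg (by omega)]
      simp

theorem twLen_le (p : List Int) (r : Int) : twLen p r ≤ p.length := by
  induction p with
  | nil => simp [twLen]
  | cons s ss ih =>
    simp only [twLen]
    split_ifs
    · simp; omega
    · simp


theorem twLen_eq_of (p : List Int) (r : Int) (L : Nat) (hL : L ≤ p.length)
    (hlt : ∀ i, i < L → p.getD i 0 ≤ r)
    (hge : L < p.length → ¬ p.getD L 0 ≤ r) :
    twLen p r = L := by
  induction p generalizing L with
  | nil =>
    simp only [List.length_nil, Nat.le_zero] at hL
    subst hL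
    rfl
  | cons s ss ih =>
    cases L with
    | zero =>
      have := hge (by simp)
      simp [List.getD] at this
      simp [twLen, this]
    | succ L' =>
      have hs : s ≤ r := by have := hlt 0 (by omega); simpa [List.getD] using this
      simp only [twLen, if_pos hs]
      have : twLen ss r = L' := by
        apply ih
        · simpa using hL
        · intro i hi
          have := hlt (i + 1) (by omega)
          simpa [List.getD] using this
        · intro h
          have := hge (by simpa using h)
          simpa [List.getD] using this
      omega

theorem psums_lower (es : List Int) (t : Int) (hnn : ∀ e ∈ es, 0 ≤ e) :
    ∀ x ∈ psums es t, t ≤ x := by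
  induction es generalizing t with
  | nil => simp [psums]
  | cons e es ih =>
    intro x hx
    simp only [psums, List.mem_cons] at hx
    have he : 0 ≤ e := hnn e (by simp)
    rcases hx with rfl | hx
    · omega
    · have := ih (t + e) (fun e' he' => hnn e' (by simp [he'])) x hx
      omega

theorem psums_pairwise (es : List Int) (t : Int) (hnn : ∀ e ∈ es, 0 ≤ e) :
    (psums es t).Pairwise (· ≤ ·) := by
  induction es generalizing t with
  | nil => simp [psums]
  | cons e es ih =>
    simp only [psums]
    refine List.Pairwise.cons ?_ (ih (t + e) (fun e' he' => hnn e' (by simp [he'])))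
    intro x hx
    have he : 0 ≤ e := hnn e (by simp)
    have := psums_lower es (t + e) (fun e' he' => hnn e' (by simp [he'])) x hx
    omega

theorem mono_of_pairwise (p : List Int) (hp : p.Pairwise (· ≤ ·)) :
    ∀ i j, i ≤ j → j < p.length → p.getD i 0 ≤ p.getD j 0 := by
  intro i j hij hj
  rcases Nat.lt_or_ge i j with h | h
  · have hi : i < p.length := by omega
    have := (List.pairwise_iff_getElem.mp hp) i j hi hj h
    rw [List.getD_eq_getElem p 0 hi, List.getD_eq_getElem p 0 hj]
    exact this
  · have : i = j := by omega
    subst this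
    exact le_refl _

theorem bisect_eq (p : List Int) (r : Int)
    (hmono : ∀ i j, i ≤ j → j < p.length → p.getD i 0 ≤ p.getD j 0) :
    ∀ lo hi, lo ≤ hi → hi ≤ p.length →
    (∀ i, i < lo → p.getD i 0 ≤ r) →
    (∀ i, hi ≤ i → i < p.length → ¬ p.getD i 0 ≤ r) →
    pvBisect p r lo hi = twLen p r := by
  intro lo hi
  induction hlh : hi - lo using Nat.strong_induction_on generalizing lo hi with
  | _ n ih =>
  intro hlohi hhi hlt hge
  rw [pvBisect]
  by_cases h : lo < hi
  · rw [dif_pos h]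
    have hmid1 : lo ≤ (lo + hi) / 2 := by omega
    have hmid2 : (lo + hi) / 2 < hi := by omega
    have hmlen : (lo + hi) / 2 < p.length := by omega
    simp only [PySem.List.pyGetD_natCast]
    by_cases hc : p.getD ((lo + hi) / 2) 0 ≤ r
    · rw [if_pos hc]
      apply ih (hi - ((lo + hi) / 2 + 1)) (by omega) _ _ rfl (by omega) hhi
      · intro i hi'
        exact le_trans (hmono i ((lo + hi) / 2) (by omega) hmlen) hc
      · exact hge
    · rw [if_neg hc]
      apply ih ((lo + hi) / 2 - lo) (by omega) _ _ rfl (by omega) (by omega) hlt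
      intro i hi1 hi2 hle
      exact hc (le_trans (hmono ((lo + hi) / 2) i hi1 hi2) hle)
  · rw [dif_neg h]
    have : lo = hi := by omega
    subst this
    exact (twLen_eq_of p r lo (by omega) hlt (fun hlen => hge lo (le_refl _) hlen)).symm

theorem pvEst_nonneg (m : List (String × String)) : 0 ≤ pvEst m := by
  unfold pvEst
  rw [PySem.Int.floordiv_eq_ediv_of_pos (by omega)]
  have : 0 ≤ PySem.Str.len (PySem.Dict.getD (⟨m⟩ : PySem.Dict String String) "content" "") := by
    rw [PySem.Str.len_eq]; positivity
  exact Int.ediv_nonneg this (by omega)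

theorem take_reverse_eq_drop (l : List (List (String × String))) (k : Nat) :
    (l.reverse.take k).reverse = l.drop (l.length - k) := by
  apply List.reverse_injective
  simp [List.take_reverse]

-- ===== VERDICT (by name: the statement is the Claim_ definition above) =====
theorem prune_conversation_history_py_spec : Claim_equal_prune_conversation_history_py := by
  intro messages max_tokens _hdom
  unfold Spec_prune_conversation_history_py prune_conversation_history_py prune_conversation_history_py_alt
  simp only []
  set sys := messages.filter (fun m => pvIsSystem m) with hsys
  set ns := messages.filter (fun m => !pvIsSystem m) with hns
  set r := max_tokens - (sys.map pvEst).sum with hr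
  by_cases hrem : r ≤ 0
  · rw [if_pos hrem, if_pos hrem]
  · rw [if_neg hrem, if_neg hrem]
    have hpre : pvBuildPrefix ns.reverse 0 [] = psums (ns.reverse.map pvEst) 0 := by
      rw [buildPrefix_eq]; simp
    have hplen : (pvBuildPrefix ns.reverse 0 []).length = ns.length := by
      rw [hpre, psums_length]; simp
    have hnn : ∀ e ∈ ns.reverse.map pvEst, 0 ≤ e := by
      intro e he
      simp only [List.mem_map] at he
      obtain ⟨m, _, rfl⟩ := he
      exact pvEst_nonneg m
    have hmono := mono_of_pairwise _ (hpre ▸ psums_pairwise (ns.reverse.map pvEst) 0 hnn)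
    have hbis : pvBisect (pvBuildPrefix ns.reverse 0 []) r 0 (pvBuildPrefix ns.reverse 0 []).length
        = twLen (pvBuildPrefix ns.reverse 0 []) r :=
      bisect_eq _ r hmono 0 _ (by omega) (le_refl _) (by omega) (by omega)
    set k := twLen (pvBuildPrefix ns.reverse 0 []) r with hk
    have hkle : k ≤ ns.length := by
      rw [hk]; calc twLen _ r ≤ _ := twLen_le _ r
        _ = ns.length := hplen
    have hA : pruneKeptA ns.reverse r [] = ns.reverse.take k := by
      rw [pruneKeptA_take ns.reverse 0 r, hk, hpre]
      norm_num
    rw [hbis, hA]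
    have hcast : (ns.length : Int) - (k : Int) = ((ns.length - k : Nat) : Int) := by
      push_cast [hkle]; ring
    rw [hcast, PySem.List.slice_from_natCast]
    rw [take_reverse_eq_drop ns k]
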